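-- pv_equiv track=rewrite | github.com/michael-horansky/battle-of-causality | functions.py | ordered_switch_flips
-- ===== SOURCE A (Python) =====
-- def ordered_switch_flips(N, S):
--     # Let [bool, bool ... bool] represent the states of N switches.
--     # This returns a list of all states with S switches on (True)
--     # ordered such that for two states differing only in the position
--     # of one on-switch, the state for which the disputed switch is at
--     # a lower index will be at a lower index in the returned list.
--     if S == 0:
--         return([[False] * N])
--     if S == N:
--         return([[True] * N])
--     else:
--         res = []
--         for last_pos in range(S - 1, N):
--             subres = ordered_switch_flips(last_pos, S - 1)
--             suffix = [True] + [False] * (N - last_pos - 1)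
--             for i in range(len(subres)):
--                 subres[i] += suffix
--             res += subres
--         return(res)
-- ===== SOURCE B (Python) =====
-- def ordered_switch_flips(N, S):
--     # Iterative enumeration: walk the sorted position-tuples of the S
--     # on-switches in colexicographic order via a successor rule, building
--     # each state directly (no recursion).
--     if S < 0 or S > max(N, 0):
--         return []
--     res = []
--     c = list(range(S))
--     while True:
--         state = [False] * N
--         for p in c:
--             state[p] = True
--         res.append(state)
--         i = 0
--         while i < S and c[i] + 1 == (c[i + 1] if i + 1 < S else N):
--             i += 1
--         if i == S:
--             return res
--         c[i] += 1
--         for j in range(i):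
--             c[j] = j
-- ===== Notes on version B (the rewrite author's own statement) =====
-- stated objective: alternative
-- what changed: Replaces A's recursion on the highest on-switch position (which rebuilds and re-concatenates suffixes onto every sub-state at each recursion level) with a flat iterative walk that steps through the on-switch position tuples in colexicographic order via a successor rule, building each state exactly once.
-- outside the precondition, e.g. on ordered_switch_flips(-2, -2): A returns [[]], B returns []; on ordered_switch_flips(-5, -1): A returns [], B returns []
import Mathlib
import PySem

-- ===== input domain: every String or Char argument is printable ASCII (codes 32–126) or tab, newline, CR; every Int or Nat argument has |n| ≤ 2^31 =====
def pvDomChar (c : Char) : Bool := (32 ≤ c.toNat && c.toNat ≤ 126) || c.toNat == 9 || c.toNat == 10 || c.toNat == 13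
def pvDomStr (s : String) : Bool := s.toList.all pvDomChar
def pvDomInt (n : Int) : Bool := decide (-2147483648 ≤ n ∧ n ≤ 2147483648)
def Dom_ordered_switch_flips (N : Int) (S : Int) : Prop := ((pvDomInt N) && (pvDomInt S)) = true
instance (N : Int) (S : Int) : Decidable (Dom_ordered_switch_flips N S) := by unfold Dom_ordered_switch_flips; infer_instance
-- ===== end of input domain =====

-- B replaces A's recursion on the highest on-switch position with an iterative
-- colexicographic successor walk over the on-position tuples (alternative algorithm).


-- ===== PORT A =====
-- fuel: each recursive call decreases S by 1; S.toNat+1 suffices on Pre_ (0 ≤ S)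
def osfA : Nat → Int → Int → List (List Bool)
  | 0, _, _ => []
  | f + 1, N, S =>
    if S = 0 then [List.replicate N.toNat false]
    else if S = N then [List.replicate N.toNat true]
    else
      (PySem.List.pyRange (S - 1) N 1).foldl
        (fun res lastPos =>
          res ++ (osfA f lastPos (S - 1)).map
            (fun st => st ++ (true :: List.replicate (N - lastPos - 1).toNat false)))
        []

def ordered_switch_flips (N : Int) (S : Int) : List (List Bool) := osfA (S.toNat + 1) N S

-- ===== PORT B =====
-- state = [False]*N; for p in c: state[p] = True
def stateOf (N : Int) (c : List Int) : List Bool :=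
  c.foldl (fun st p => st.set p.toNat true) (List.replicate N.toNat false)

-- i = 0; while i < S and c[i]+1 == (c[i+1] if i+1 < S else N): i += 1
def findi (N : Int) : List Int → Nat
  | [] => 0
  | a :: rest => if a + 1 = rest.headD N then findi N rest + 1 else 0

-- c[i] += 1; for j in range(i): c[j] = j
def nextc (c : List Int) (i : Nat) : List Int :=
  (List.range i).map Int.ofNat ++ (((c.drop i).headD 0) + 1) :: c.drop (i + 1)

-- the while-True loop; fuel bounds the number of appended states
def osfB (N : Int) : Nat → List Int → List (List Bool) → List (List Bool)
  | 0, _, res => res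
  | f + 1, c, res =>
    let res' := res ++ [stateOf N c]
    let i := findi N c
    if i = c.length then res' else osfB N f (nextc c i) res'

def ordered_switch_flips_alt (N : Int) (S : Int) : List (List Bool) :=
  if S < 0 ∨ S > max N 0 then []
  else osfB N (2 ^ N.toNat + 1) ((List.range S.toNat).map Int.ofNat) []

-- ===== PRECONDITION & SPEC =====
-- Pre_ excludes S < 0, where A either raises RecursionError (N > S) or returns
-- degenerate values ([] for N < S, [[True]*S] == [[]] for N == S) that are artefacts
-- of Python's negative-count list repetition; B returns [] there.
def Pre_ordered_switch_flips (N : Int) (S : Int) : Prop := 0 ≤ S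
instance (N : Int) (S : Int) : Decidable (Pre_ordered_switch_flips N S) := by
  unfold Pre_ordered_switch_flips; infer_instance

def pvWitness_ordered_switch_flips : Int × Int := (3, 2)

def Spec_ordered_switch_flips (N : Int) (S : Int) (out : List (List Bool)) : Prop :=
  out = ordered_switch_flips_alt N S
instance (N : Int) (S : Int) (out : List (List Bool)) : Decidable (Spec_ordered_switch_flips N S out) := by
  unfold Spec_ordered_switch_flips; infer_instance

-- ===== CLAIM (what is proved, stated in full; the proofs are below) =====
def Claim_equal_ordered_switch_flips : Prop := ∀ (N : Int) (S : Int), Dom_ordered_switch_flips N S → Pre_ordered_switch_flips N S → Spec_ordered_switch_flips N S (ordered_switch_flips N S)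

-- ===== LEMMAS AND PROOFS =====

-- canonical colex-ordered list of the S on-positions (c ++ [p]: p = highest position)
def combs : Nat → Nat → List (List Int)
  | _, 0 => [[]]
  | n, s + 1 => (List.range' s (n - s)).flatMap fun p => (combs p s).map (· ++ [(p : Int)])
  termination_by n s => s

-- the state of N switches with the positions in c on
def toState (N : Int) (c : List Int) : List Bool :=
  (List.range N.toNat).map fun j => decide ((Int.ofNat j) ∈ c)

def firstC (s : Nat) : List Int := (List.range s).map Int.ofNat
def lastC (n s : Nat) : List Int := (List.range' (n - s) s).map Int.ofNat

def stepc (N : Int) (c : List Int) : Option (List Int) :=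
  if findi N c = c.length then none else some (nextc c (findi N c))

def orbit (N : Int) : Nat → List Int → List (List Int)
  | 0, _ => []
  | f + 1, c => c :: (match stepc N c with
      | none => []
      | some c' => orbit N f c')

lemma combs_nil (n s : Nat) (h : n < s) : combs n s = [] := by
  cases s with
  | zero => omega
  | succ s' =>
      have : n - s' = 0 := by omega
      simp [combs, this]

lemma combs_pascal (n s : Nat) :
    combs (n + 1) (s + 1) = combs n (s + 1) ++ (combs n s).map (· ++ [(n : Int)]) := by
  by_cases h : s ≤ n
  · have h1 : (n + 1) - s = (n - s) + 1 := by omega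
    have h2 : s + (n - s) = n := by omega
    have h2' : s + 1 * (n - s) = n := by omega
    rw [combs, combs, h1, List.range'_concat, h2', List.flatMap_append]
    simp
  · have h1 : (n + 1) - s = 0 ∨ ((n + 1) - s = 1 ∧ s = n) := by omega
    rcases h1 with h1 | ⟨h1, h1'⟩
    · rw [combs, combs, h1]
      have h2 : n - s = 0 := by omega
      rw [h2]
      simp [combs_nil n s (by omega)]
    · rw [combs, combs, h1]
      have h2 : n - s = 0 := by omega
      rw [h2, h1']
      simp

lemma combs_len_le (n s : Nat) : (combs n s).length ≤ 2 ^ n := by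
  induction n generalizing s with
  | zero =>
      cases s with
      | zero => simp [combs]
      | succ s' => simp [combs_nil 0 (s' + 1) (by omega)]
  | succ m ih =>
      cases s with
      | zero => simp [combs]; exact Nat.one_le_two_pow
      | succ s' =>
          rw [combs_pascal]
          simp only [List.length_append, List.length_map]
          calc (combs m (s' + 1)).length + (combs m s').length
              ≤ 2 ^ m + 2 ^ m := Nat.add_le_add (ih _) (ih _)
            _ = 2 ^ (m + 1) := by ring

lemma combs_mem_lt (s n : Nat) (c : List Int) (hc : c ∈ combs n s) :
    ∀ x ∈ c, 0 ≤ x ∧ x < (n : Int) := by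
  induction s generalizing n c with
  | zero => simp [combs] at hc; simp [hc]
  | succ s' ih =>
      rw [combs] at hc
      simp only [List.mem_flatMap, List.mem_map] at hc
      obtain ⟨p, hp, c', hc', rfl⟩ := hc
      have hpn : p < n := by
        have := List.mem_range'_1.mp hp; omega
      intro x hx
      rcases List.mem_append.mp hx with hx | hx
      · have := ih p c' hc' x hx
        constructor
        · exact this.1
        · exact lt_trans this.2 (by exact_mod_cast hpn)
      · simp at hx; subst hx
        exact ⟨Int.natCast_nonneg p, by exact_mod_cast hpn⟩

lemma combs_nn (n : Nat) : combs n n = [firstC n] := by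
  induction n with
  | zero => simp [combs, firstC]
  | succ m ih =>
      rw [combs_pascal, combs_nil m (m + 1) (by omega), ih]
      simp [firstC, List.range_succ]

lemma toState_nil (N : Int) : toState N [] = List.replicate N.toNat false := by
  simp [toState, List.map_const']

lemma toState_first (N : Int) : toState N (firstC N.toNat) = List.replicate N.toNat true := by
  unfold toState firstC
  rw [List.map_congr_left (g := fun _ => true)
    (fun j hj => by simp only [decide_eq_true_eq, List.mem_map]; exact ⟨j, hj, rfl⟩),
    List.map_const']
  simp

lemma toState_append_top (N : Int) (p : Nat) (c : List Int) (hp : (p : Int) < N)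
    (hc : ∀ x ∈ c, 0 ≤ x ∧ x < (p : Int)) :
    toState N (c ++ [(p : Int)]) =
      toState (p : Int) c ++ true :: List.replicate (N - (p : Int) - 1).toNat false := by
  have hN : N.toNat = p + ((N - (p : Int) - 1).toNat + 1) := by omega
  unfold toState
  rw [hN, List.range_add, List.map_append]
  congr 1
  · rw [show ((p:Int)).toNat = p by omega]
    apply List.map_congr_left
    intro j hj
    have hjp : j < p := List.mem_range.mp hj
    apply decide_eq_decide.mpr
    simp only [List.mem_append, List.mem_singleton]
    constructor
    · rintro (h | h)
      · exact h
      · exfalso; simp only [Int.ofNat_eq_natCast] at h; omega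
    · exact Or.inl
  · rw [List.range_succ_eq_map, List.map_cons, List.map_map]
    refine List.cons_eq_cons.mpr ⟨by simp, ?_⟩
    · rw [List.eq_replicate_iff]
      refine ⟨by simp, ?_⟩
      intro b hb
      simp only [List.mem_map, List.mem_range, Function.comp_apply] at hb
      obtain ⟨j, hj, rfl⟩ := hb
      simp only [List.mem_append, List.mem_singleton, Int.ofNat_eq_natCast,
        decide_eq_false_iff_not]
      obtain ⟨a, ha, rfl⟩ := hj
      rintro (h | h)
      · have := (hc _ h).2; omega
      · omega

lemma pyRange_eq_range' (a b : Int) (ha : 0 ≤ a) :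
    PySem.List.pyRange a b 1 = (List.range' a.toNat (b.toNat - a.toNat)).map Int.ofNat := by
  rw [PySem.List.pyRange_one, List.range'_eq_map_range, List.map_map]
  have hl : (b - a).toNat = b.toNat - a.toNat := by omega
  rw [hl]
  apply List.map_congr_left
  intro k _
  simp only [Function.comp_apply, Int.ofNat_eq_natCast]
  omega

lemma A_eq (f : Nat) (N S : Int) (hS : 0 ≤ S) (hf : S.toNat < f) :
    osfA f N S = (combs N.toNat S.toNat).map (toState N) := by
  induction f generalizing N S with
  | zero => omega
  | succ f ih =>
      rw [osfA]
      by_cases h0 : S = 0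
      · subst h0
        simp [combs, toState_nil]
      · rw [if_neg h0]
        by_cases hSN : S = N
        · subst hSN
          rw [if_pos rfl, combs_nn, List.map_singleton, toState_first]
        · rw [if_neg hSN]
          rw [PySem.List.foldl_append_eq_flatMap, List.nil_append]
          rw [pyRange_eq_range' _ _ (by omega)]
          have hsplit : S.toNat = (S - 1).toNat + 1 := by omega
          rw [hsplit, combs]
          rw [List.map_flatMap, List.flatMap_map]
          have hlen : N.toNat - (S - 1).toNat = N.toNat - (S-1).toNat := rfl
          rw [List.flatMap_def, List.flatMap_def]
          congr 1
          apply List.map_congr_left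
          intro p hp
          have hpb := List.mem_range'_1.mp hp
          have hp_lt : (p : Int) < N := by omega
          have ihp := ih (p : Int) (S - 1) (by omega) (by omega)
          have hptn : ((p : Int)).toNat = p := by omega
          rw [hptn] at ihp
          simp only [Int.ofNat_eq_natCast, ihp, List.map_map]
          apply List.map_congr_left
          intro c hc
          have hcb := combs_mem_lt (S - 1).toNat p c hc
          simp only [Function.comp_apply]
          rw [toState_append_top N p c hp_lt hcb]

lemma foldl_set_getElem? (c : List Int) (st : List Bool) (j : Nat) :
    (c.foldl (fun st p => st.set p.toNat true) st)[j]? =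
      st[j]?.map (fun b => b || decide (∃ p ∈ c, p.toNat = j)) := by
  induction c generalizing st with
  | nil =>
      simp [Option.map_id']
  | cons q c' ih =>
      rw [List.foldl_cons, ih, List.getElem?_set]
      by_cases hq : q.toNat = j
      · simp only [hq]
        by_cases hj : j < st.length
        · rw [List.getElem?_eq_getElem hj]
          simp
          exact ⟨hj, Or.inr (Or.inl hq)⟩
        · rw [List.getElem?_eq_none (by omega)]
          simp [hj]
      · rw [if_neg (by omega)]
        cases hst : st[j]? with
        | none => simp
        | some b =>
            simp only [Option.map_some]
            congr 2
            apply decide_eq_decide.mpr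
            constructor
            · rintro ⟨p, hp, rfl⟩; exact ⟨p, List.mem_cons_of_mem _ hp, rfl⟩
            · rintro ⟨p, hp, rfl⟩
              rcases List.mem_cons.mp hp with rfl | hp'
              · exact absurd rfl hq
              · exact ⟨p, hp', rfl⟩

lemma stateOf_eq_toState (N : Int) (c : List Int) (hc : ∀ x ∈ c, 0 ≤ x ∧ x < N) :
    stateOf N c = toState N c := by
  unfold stateOf toState
  apply List.ext_getElem?
  intro j
  rw [foldl_set_getElem?]
  by_cases hj : j < N.toNat
  · rw [List.getElem?_eq_getElem (by simpa using hj), List.getElem?_eq_getElem (by simpa using hj)]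
    simp only [List.getElem_replicate, Option.map_some, List.getElem_map, List.getElem_range,
      Bool.false_or]
    congr 2
    apply propext
    constructor
    · rintro ⟨p, hp, rfl⟩
      have h2 := hc p hp
      have hpe : (Int.ofNat p.toNat) = p := by simp only [Int.ofNat_eq_natCast]; omega
      rw [hpe]
      exact hp
    · intro h
      exact ⟨Int.ofNat j, h, by simp⟩
  · rw [List.getElem?_eq_none (by simpa using hj), List.getElem?_eq_none (by simpa using hj)]
    simp

lemma lastC_cons (n s : Nat) (h : s + 1 ≤ n) :
    lastC n (s + 1) = ((n - (s + 1) : Nat) : Int) :: lastC n s := by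
  unfold lastC
  rw [List.range'_succ, List.map_cons, show n - (s + 1) + 1 = n - s from by omega]
  rfl

lemma findi_lastC' (s n : Nat) (t : List Int) (N : Int) :
    s + 1 ≤ n →
    findi N (lastC n (s + 1) ++ t) =
      if (n : Int) = t.headD N then (s + 1) + findi N t else s := by
  induction s with
  | zero =>
      intro h2
      rw [lastC_cons n 0 h2]
      have hz : lastC n 0 = [] := by simp [lastC]
      rw [hz]
      simp only [List.cons_append, List.nil_append, findi]
      rw [show ((n - 1 : Nat) : Int) + 1 = (n : Int) from by omega]
      split_ifs with h <;> omega
  | succ s' ih =>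
      intro h2
      rw [lastC_cons n (s' + 1) h2, List.cons_append, findi]
      have hh : ((lastC n (s' + 1) ++ t).headD N) = ((n - (s' + 1) : Nat) : Int) := by
        rw [lastC_cons n s' (by omega), List.cons_append]
        rfl
      rw [hh, if_pos (by omega), ih (by omega)]
      split_ifs with h <;> omega

lemma osfB_orbit (f : Nat) (N : Int) (c : List Int) (res : List (List Bool)) :
    osfB N f c res = res ++ (orbit N f c).map (stateOf N) := by
  induction f generalizing c res with
  | zero => simp [osfB, orbit]
  | succ f ih =>
      rw [osfB, orbit]
      by_cases h : findi N c = c.length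
      · simp [stepc, h]
      · simp only [stepc, h, ih]
        simp [List.append_assoc]

lemma firstC_succ (s : Nat) : firstC (s + 1) = firstC s ++ [(s : Int)] := by
  simp [firstC, List.range_succ]

lemma lastC_snoc (m s' : Nat) (h : s' ≤ m) :
    lastC (m + 1) (s' + 1) = lastC m s' ++ [((m : Nat) : Int)] := by
  unfold lastC
  rw [show (m + 1) - (s' + 1) = m - s' from by omega, List.range'_concat, List.map_append,
    show m - s' + 1 * s' = m from by omega]
  rfl

lemma length_lastC (n s : Nat) : (lastC n s).length = s := by
  simp [lastC]

lemma stepc_block (m s' : Nat) (t : List Int) (N : Int) (hsm : s' + 1 ≤ m)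
    (hH : ((m : Nat) : Int) < t.headD N) :
    stepc N (lastC m (s' + 1) ++ t) = some (firstC s' ++ (((m : Nat) : Int) :: t)) := by
  have hfi : findi N (lastC m (s' + 1) ++ t) = s' := by
    rw [findi_lastC' s' m t N hsm, if_neg (by intro h; rw [← h] at hH; omega)]
  unfold stepc
  rw [hfi, if_neg (by rw [List.length_append, length_lastC]; omega)]
  congr 1
  unfold nextc firstC
  have hd1 : (lastC m (s' + 1) ++ t).drop s' = ((m - 1 : Nat) : Int) :: t := by
    rw [List.drop_append_of_le_length (by rw [length_lastC]; omega)]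
    unfold lastC
    rw [← List.map_drop, List.drop_range',
      show m - (s' + 1) + s' * 1 = m - 1 from by omega, show s' + 1 - s' = 1 from by omega]
    rfl
  have hd2 : (lastC m (s' + 1) ++ t).drop (s' + 1) = t := by
    rw [List.drop_append_of_le_length (by rw [length_lastC])]
    rw [show (lastC m (s' + 1)).drop (s' + 1) = [] from by
        apply List.drop_eq_nil_of_le; rw [length_lastC]]
    rfl
  rw [hd1, hd2]
  simp only [List.headD_cons]
  rw [show ((m - 1 : Nat) : Int) + 1 = ((m : Nat) : Int) from by omega]

lemma orbit_combs_zero (n : Nat) (t : List Int) (N : Int) (fuel : Nat) :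
    orbit N ((combs n 0).length + fuel) (firstC 0 ++ t) =
      (combs n 0).map (· ++ t) ++ (match stepc N (lastC n 0 ++ t) with
        | none => [] | some c' => orbit N fuel c') := by
  have h1 : combs n 0 = [[]] := by rw [combs]
  have h2 : lastC n 0 = [] := by simp [lastC]
  have h3 : firstC 0 = [] := by simp [firstC]
  rw [h1, h2, h3, List.nil_append]
  show orbit N (1 + fuel) t = _
  rw [Nat.add_comm 1 fuel, orbit]
  cases stepc N t <;> simp

lemma orbit_combs (n : Nat) : ∀ (s : Nat) (t : List Int) (N : Int) (fuel : Nat),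
    s ≤ n → (n : Int) ≤ t.headD N →
    orbit N ((combs n s).length + fuel) (firstC s ++ t) =
      (combs n s).map (· ++ t) ++ (match stepc N (lastC n s ++ t) with
        | none => []
        | some c' => orbit N fuel c') := by
  induction n with
  | zero =>
      intro s t N fuel hsn hH
      exact (by omega : s = 0) ▸ orbit_combs_zero 0 t N fuel
  | succ m ih =>
      intro s t N fuel hsn hH
      cases s with
      | zero => exact orbit_combs_zero (m + 1) t N fuel
      | succ s' =>
          have hs'm : s' ≤ m := by omega
          by_cases hsm : s' + 1 ≤ m
          · have hH' : ((m : Nat) : Int) ≤ t.headD N := by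
              have h := hH; push_cast at h ⊢; omega
            have hHlt : ((m : Nat) : Int) < t.headD N := by
              have h := hH; push_cast at h ⊢; omega
            have e1 := ih (s' + 1) t N ((combs m s').length + fuel) hsm hH'
            have e2 := ih s' (((m : Nat) : Int) :: t) N fuel hs'm (by simp)
            rw [stepc_block m s' t N hsm hHlt] at e1
            have hflen : (combs (m + 1) (s' + 1)).length + fuel
                = (combs m (s' + 1)).length + ((combs m s').length + fuel) := by
              rw [combs_pascal]; simp [List.length_append]; omega
            rw [hflen, e1]
            show (combs m (s' + 1)).map (· ++ t) ++
                orbit N ((combs m s').length + fuel) (firstC s' ++ (((m : Nat) : Int) :: t)) = _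
            rw [e2]
            have hmap : ((combs m s').map (fun c => c ++ [((m : Nat) : Int)])).map (fun c => c ++ t)
                = (combs m s').map (fun c => c ++ (((m : Nat) : Int) :: t)) := by
              rw [List.map_map]; apply List.map_congr_left; intro c _
              simp
            have hlast : lastC m s' ++ (((m : Nat) : Int) :: t) = lastC (m + 1) (s' + 1) ++ t := by
              rw [lastC_snoc m s' hs'm, List.append_assoc]; rfl
            rw [combs_pascal m s', List.map_append, hmap, hlast, List.append_assoc]
          · have hse : s' = m := by omega
            subst hse
            have e2 := ih s' (((s' : Nat) : Int) :: t) N fuel le_rfl (by simp)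
            have hf : firstC (s' + 1) ++ t = firstC s' ++ (((s' : Nat) : Int) :: t) := by
              rw [firstC_succ, List.append_assoc]; rfl
            have hlen : (combs (s' + 1) (s' + 1)).length = (combs s' s').length := by
              rw [combs_pascal, combs_nil s' (s' + 1) (by omega)]; simp
            rw [hlen, hf, e2]
            have hmap : ((combs s' s').map (fun c => c ++ [((s' : Nat) : Int)])).map (fun c => c ++ t)
                = (combs s' s').map (fun c => c ++ (((s' : Nat) : Int) :: t)) := by
              rw [List.map_map]; apply List.map_congr_left; intro c _
              simp
            have hlast : lastC s' s' ++ (((s' : Nat) : Int) :: t) = lastC (s' + 1) (s' + 1) ++ t := by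
              rw [lastC_snoc s' s' le_rfl, List.append_assoc]; rfl
            rw [combs_pascal s' s', combs_nil s' (s' + 1) (by omega), List.nil_append,
              hmap, hlast]

-- ===== VERDICT (by name: the statement is the Claim_ definition above) =====
theorem ordered_switch_flips_spec : Claim_equal_ordered_switch_flips := by
  intro N S _ hPre
  unfold Pre_ordered_switch_flips at hPre
  unfold Spec_ordered_switch_flips ordered_switch_flips ordered_switch_flips_alt
  by_cases hg : S < 0 ∨ S > max N 0
  · rw [if_pos hg]
    rcases hg with h | h
    · omega
    · rw [A_eq _ N S hPre (by omega),
        combs_nil N.toNat S.toNat (by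
          rcases le_total N 0 with hN | hN
          · rw [max_eq_right hN] at h; omega
          · rw [max_eq_left hN] at h; omega)]
      rfl
  · rw [if_neg hg]
    have hub : S ≤ max N 0 := by by_contra hc; exact hg (Or.inr (by omega))
    by_cases hN : N < 0
    · have hS0 : S = 0 := by
        have hm : max N 0 = 0 := max_eq_right (by omega)
        omega
      subst hS0
      rw [show ((0:Int).toNat + 1) = 1 from rfl, osfA, if_pos rfl]
      rw [show (List.range (0:Int).toNat).map Int.ofNat = [] from by simp]
      rw [osfB]
      simp [findi, stateOf]
    · have hm : max N 0 = N := max_eq_left (by omega)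
      have hsn : S.toNat ≤ N.toNat := by omega
      rw [A_eq _ N S hPre (by omega), osfB_orbit, List.nil_append]
      obtain ⟨k, hk⟩ : ∃ k, 2 ^ N.toNat + 1 = (combs N.toNat S.toNat).length + k :=
        ⟨2 ^ N.toNat + 1 - (combs N.toNat S.toNat).length, by
          have := combs_len_le N.toNat S.toNat; omega⟩
      rw [hk]
      have hG := orbit_combs N.toNat S.toNat [] N k hsn
        (by simp only [List.headD_nil]; omega)
      rw [List.append_nil, List.append_nil] at hG
      have hstep : stepc N (lastC N.toNat S.toNat) = none := by
        have hfi : findi N (lastC N.toNat S.toNat) = S.toNat := by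
          cases hs : S.toNat with
          | zero => simp [lastC, findi]
          | succ s'' =>
              have hfl := findi_lastC' s'' N.toNat [] N (by omega)
              rw [List.append_nil] at hfl
              rw [hfl, if_pos (by simp only [List.headD_nil]; omega)]
              simp [findi]
        unfold stepc
        rw [hfi, length_lastC, if_pos rfl]
      rw [hstep] at hG
      rw [show (List.range S.toNat).map Int.ofNat = firstC S.toNat from rfl, hG]
      show _ = ((combs N.toNat S.toNat).map (fun x => x ++ []) ++ []).map (stateOf N)
      rw [List.append_nil, List.map_map]
      apply List.map_congr_left
      intro c hc
      have hcb := combs_mem_lt S.toNat N.toNat c hc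
      have hcN : ∀ x ∈ c, 0 ≤ x ∧ x < N := fun x hx => by
        have := hcb x hx; omega
      simp only [Function.comp_apply, List.append_nil]
      exact (stateOf_eq_toState N c hcN).symm
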